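-- pv_equiv track=rewrite | github.com/SangHui48/study_algorithm | programmers/lv2/택배상자.py | solution
-- ===== SOURCE A (Python) =====
-- from collections import deque
--
-- def solution(order):
--     answer = 0
--     order = deque(order)
--     stack = []
--     for i in range(1, len(order) + 1):
--         stack.append(i)
--         while stack and order[0] == stack[-1]:
--             answer += 1
--             stack.pop()
--             order.popleft()
--     return answer
-- ===== SOURCE B (Python) =====
-- def solution(order):
--     answer = 0
--     n = len(order)
--     stack = []
--     nxt = 1  # next box number to push
--     for target in order:
--         while nxt <= n and (not stack or stack[-1] != target):
--             stack.append(nxt)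
--             nxt += 1
--         if stack and stack[-1] == target:
--             stack.pop()
--             answer += 1
--         else:
--             break
--     return answer
-- ===== Notes on version B (the rewrite author's own statement) =====
-- stated objective: alternative
-- what changed: B drives the simulation by the target sequence (pop-driven, lazy pushes, early break on a stuck target) instead of A's push-index loop with an eager inner pop loop over a deque.
import Mathlib
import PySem

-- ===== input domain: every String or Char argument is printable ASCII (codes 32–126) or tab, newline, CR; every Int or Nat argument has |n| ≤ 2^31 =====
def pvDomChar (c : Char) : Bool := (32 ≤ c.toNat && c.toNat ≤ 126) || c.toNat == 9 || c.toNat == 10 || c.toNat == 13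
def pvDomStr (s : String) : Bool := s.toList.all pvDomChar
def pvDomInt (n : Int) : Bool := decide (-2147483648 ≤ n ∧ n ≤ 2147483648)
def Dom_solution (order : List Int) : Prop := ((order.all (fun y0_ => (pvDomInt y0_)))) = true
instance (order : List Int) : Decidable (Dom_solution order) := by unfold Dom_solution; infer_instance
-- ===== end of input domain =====

-- B re-drives the same stack strategy from the target side (lazy pushes, early break) instead of
-- A's push-index loop with an eager inner pop loop over a deque; alternative decomposition, same cost.

-- ===== PORT A =====
-- inner `while stack and order[0] == stack[-1]`: pops matching heads; stack head = stack top.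
-- (the case stack ≠ [] ∧ order = [] — where Python would index an empty deque — is unreachable
-- from solution's initial state; the equation returns the state unchanged there)
def solPop : List Int → List Int → Int → List Int × List Int × Int
  | o :: os, t :: ts, ans => if o = t then solPop os ts (ans + 1) else (o :: os, t :: ts, ans)
  | ord, stk, ans => (ord, stk, ans)

-- `for i in range(1, len(order)+1): stack.append(i); <inner while>`
def solutionGo : List Int → List Int → List Int → Int → Int
  | [], _, _, ans => ans
  | i :: rest, ord, stk, ans =>
    let r := solPop ord (i :: stk) ans
    solutionGo rest r.1 r.2.1 r.2.2

def solution (order : List Int) : Int :=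
  solutionGo (PySem.List.pyRange 1 ((order.length : Int) + 1) 1) order [] 0

-- ===== PORT B =====
-- `while nxt <= n and (not stack or stack[-1] != target): stack.append(nxt); nxt += 1`
def pushLoop (n target nxt : Int) (stk : List Int) : Int × List Int :=
  if nxt ≤ n ∧ stk.head? ≠ some target then
    pushLoop n target (nxt + 1) (nxt :: stk)
  else (nxt, stk)
termination_by (n + 1 - nxt).toNat
decreasing_by omega

-- `for target in order: <push loop>; if top == target: pop; answer += 1 else: break`
def solAltGo (n : Int) : List Int → Int → List Int → Int → Int
  | [], _, _, ans => ans
  | t :: rest, nxt, stk, ans =>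
    let r := pushLoop n t nxt stk
    match r.2 with
    | s :: ss => if s = t then solAltGo n rest r.1 ss (ans + 1) else ans
    | [] => ans

def solution_alt (order : List Int) : Int :=
  solAltGo (order.length : Int) order 1 [] 0

-- ===== PRECONDITION & SPEC =====
def Spec_solution (order : List Int) (out : Int) : Prop := out = solution_alt order
instance (order : List Int) (out : Int) : Decidable (Spec_solution order out) := by unfold Spec_solution; infer_instance

-- ===== CLAIM (what is proved, stated in full; the proofs are below) =====
def Claim_equal_solution : Prop := ∀ (order : List Int), Dom_solution order → Spec_solution order (solution order)

-- ===== LEMMAS AND PROOFS =====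

-- "the inner while of A has stopped": heads of order and stack differ (or one side is empty)
def mism : List Int → List Int → Prop
  | o :: _, s :: _ => o ≠ s
  | _, _ => True

theorem solPop_mism (ord stk : List Int) (ans : Int) :
    mism (solPop ord stk ans).1 (solPop ord stk ans).2.1 := by
  fun_induction solPop ord stk ans with
  | case1 os t ts ans ih => exact ih
  | case2 o os t ts ans h => simpa [mism] using h
  | case3 ord stk ans h =>
    cases ord with
    | nil => cases stk <;> simp [mism]
    | cons o os =>
      cases stk with
      | nil => simp [mism]
      | cons t ts => exact (h o os t ts rfl rfl).elim

theorem solutionGo_nil (pushes : List Int) (stk : List Int) (ans : Int) :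
    solutionGo pushes [] stk ans = ans := by
  induction pushes generalizing stk with
  | nil => rfl
  | cons i rest ih => simpa [solutionGo, solPop] using ih (i :: stk)

theorem pushLoop_stop {n target nxt : Int} {stk : List Int}
    (h : ¬ (nxt ≤ n ∧ stk.head? ≠ some target)) :
    pushLoop n target nxt stk = (nxt, stk) := by
  rw [pushLoop, if_neg h]

theorem pushLoop_step {n target nxt : Int} {stk : List Int}
    (h1 : nxt ≤ n) (h2 : stk.head? ≠ some target) :
    pushLoop n target nxt stk = pushLoop n target (nxt + 1) (nxt :: stk) := by
  rw [pushLoop, if_pos ⟨h1, h2⟩]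

-- B pops matching heads exactly like A's inner while (no pushes happen there)
theorem popsim (n : Int) (ord stk : List Int) (ans : Int) (nxt : Int) :
    solAltGo n ord nxt stk ans
      = solAltGo n (solPop ord stk ans).1 nxt (solPop ord stk ans).2.1 (solPop ord stk ans).2.2 := by
  fun_induction solPop ord stk ans with
  | case1 os t ts ans ih =>
    have hp : pushLoop n t nxt (t :: ts) = (nxt, t :: ts) := pushLoop_stop (by simp)
    rw [show solAltGo n (t :: os) nxt (t :: ts) ans = solAltGo n os nxt ts (ans + 1) by
      simp [solAltGo, hp]]
    exact ih
  | case2 o os t ts ans h => rfl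
  | case3 ord stk ans h => rfl

theorem altGo_done {n i : Int} (h : n < i) (ord stk : List Int) (ans : Int)
    (hm : mism ord stk) : solAltGo n ord i stk ans = ans := by
  cases ord with
  | nil => rfl
  | cons t rest =>
    have hstop : pushLoop n t i stk = (i, stk) := pushLoop_stop (by intro hc; omega)
    cases stk with
    | nil => simp [solAltGo, hstop]
    | cons s ss =>
      have hne : s ≠ t := fun he => hm he.symm
      simp [solAltGo, hstop, hne]

theorem pyRange_done {i b : Int} (h : b ≤ i) : PySem.List.pyRange i b 1 = [] := by
  rw [PySem.List.pyRange_one]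
  have : (b - i).toNat = 0 := by omega
  simp [this]

theorem main (k : Nat) : ∀ (n i : Int), (n + 1 - i).toNat ≤ k →
    ∀ (ord stk : List Int) (ans : Int), mism ord stk →
    solutionGo (PySem.List.pyRange i (n + 1) 1) ord stk ans = solAltGo n ord i stk ans := by
  induction k with
  | zero =>
    intro n i hk ord stk ans hm
    have hlt : n < i := by omega
    rw [pyRange_done (by omega), solutionGo, altGo_done hlt ord stk ans hm]
  | succ k ih =>
    intro n i hk ord stk ans hm
    by_cases hlt : n < i
    · rw [pyRange_done (by omega), solutionGo, altGo_done hlt ord stk ans hm]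
    · have hi : i ≤ n := by omega
      rw [PySem.List.pyRange_one_cons (by omega)]
      cases ord with
      | nil =>
        simp only [solutionGo]
        rw [show solPop [] (i :: stk) ans = ([], i :: stk, ans) from rfl]
        rw [solutionGo_nil]
        rfl
      | cons t rest =>
        -- A: push i then run the inner pop loop; B: pushLoop takes exactly one step here
        have hhead : stk.head? ≠ some t := by
          cases stk with
          | nil => simp
          | cons s ss => simpa using fun he => hm he.symm
        have hB : solAltGo n (t :: rest) i stk ans
            = solAltGo n (t :: rest) (i + 1) (i :: stk) ans := by
          simp only [solAltGo]
          rw [pushLoop_step hi hhead]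
        rw [hB, popsim n (t :: rest) (i :: stk) ans (i + 1)]
        simp only [solutionGo]
        exact ih n (i + 1) (by omega) _ _ _ (solPop_mism (t :: rest) (i :: stk) ans)

-- ===== VERDICT (by name: the statement is the Claim_ definition above) =====
theorem solution_spec : Claim_equal_solution := by
  intro order _
  unfold Spec_solution solution solution_alt
  exact main order.length (order.length : Int) 1 (by omega) order [] 0 (by cases order <;> trivial)
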